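-- pv_equiv track=rewrite | github.com/seolyucode/problemSolving | inHome/Study/라/1.py | solution
-- ===== SOURCE A (Python) =====
-- def solution(boxes):
--     lst = []
--     for i in range(len(boxes)):
--         for j in range(2):
--             if len(lst) == 0:
--                 lst.append(boxes[i][j])
--             else:
--                 for k in range(len(lst)):
--                     if boxes[i][j] == lst[k]:
--                         lst[k] = 0
--                         boxes[i][j] = 0
--                 else:
--                     lst.append(boxes[i][j])
--     cnt = 0
--     for i in lst:
--         if i != 0:
--             cnt += 1
--     return cnt//2
-- ===== SOURCE B (Python) =====
-- def solution(boxes):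
--     cnt = {}
--     for box in boxes:
--         for v in (box[0], box[1]):
--             if v != 0:
--                 cnt[v] = cnt.get(v, 0) + 1
--     return sum(c % 2 for c in cnt.values()) // 2
-- ===== Notes on version B (the rewrite author's own statement) =====
-- stated objective: faster
-- what changed: Replaced A's quadratic in-place pairwise-cancellation scan of a growing list by a single pass building a dict of counts of the nonzero values box[0], box[1], returning the sum of count parities halved.
import Mathlib
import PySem

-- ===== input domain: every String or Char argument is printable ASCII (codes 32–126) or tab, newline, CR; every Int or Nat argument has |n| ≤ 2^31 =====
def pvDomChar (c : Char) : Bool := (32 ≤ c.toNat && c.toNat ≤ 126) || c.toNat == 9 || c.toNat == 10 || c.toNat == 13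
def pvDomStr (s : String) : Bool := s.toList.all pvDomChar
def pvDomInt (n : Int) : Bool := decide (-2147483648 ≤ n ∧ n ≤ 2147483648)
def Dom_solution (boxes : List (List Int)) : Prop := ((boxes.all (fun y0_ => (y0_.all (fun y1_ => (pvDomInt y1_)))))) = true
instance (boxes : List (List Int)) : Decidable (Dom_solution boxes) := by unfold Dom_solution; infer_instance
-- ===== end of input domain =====

-- B replaces A's quadratic cancellation-list scan by one counting pass over a dict (asymptotically
-- faster, as measured). Return values only: Python A mutates its argument (sets boxes[i][j] = 0 on a
-- match), B does not; the equivalence proved here is about the returned int.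

-- ===== PORT A =====
-- inner 'for k in range(len(lst)): if v == lst[k]: lst[k] = 0; v = 0' (v is boxes[i][j], re-read
-- after mutation; it is only read inside this loop, so it is carried as the second state component)
def pvScan (lst : List Int) (v : Int) : List Int × Int :=
  (List.range lst.length).foldl
    (fun s k => if s.2 == s.1.getD k 0 then (s.1.set k 0, 0) else s) (lst, v)

-- body of 'for j in range(2)': the empty-list branch, else scan then (for/else, no break) append
def pvStepJ (lst : List Int) (v : Int) : List Int :=
  if lst.length == 0 then lst ++ [v]
  else
    let s := pvScan lst v
    s.1 ++ [s.2]

def solution (boxes : List (List Int)) : Int :=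
  let lst := boxes.foldl
    (fun lst box =>
      (List.range 2).foldl (fun lst (j : Nat) => pvStepJ lst ((PySem.List.pyGet? box (j : Int)).getD 0)) lst)
    []
  let cnt := lst.foldl (fun c i => if i != 0 then c + 1 else c) (0 : Int)
  PySem.Int.floordiv cnt 2

-- ===== PORT B =====
def solution_alt (boxes : List (List Int)) : Int :=
  let cnt : PySem.Dict Int Int := boxes.foldl
    (fun d box =>
      [(PySem.List.pyGet? box (0 : Int)).getD 0, (PySem.List.pyGet? box (1 : Int)).getD 0].foldl
        (fun d v => if v != 0 then d.insert v (d.getD v 0 + 1) else d) d)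
    PySem.Dict.empty
  PySem.Int.floordiv ((cnt.values.map (fun c => PySem.Int.mod c 2)).sum) 2

-- ===== PRECONDITION & SPEC =====
-- Pre_ excludes exactly the inputs on which A (and B) raise IndexError: an inner list shorter than 2
def Pre_solution (boxes : List (List Int)) : Prop := ∀ b ∈ boxes, 2 ≤ b.length
instance (boxes : List (List Int)) : Decidable (Pre_solution boxes) := by
  unfold Pre_solution; infer_instance
def pvWitness_solution : List (List Int) := [[1, 2], [3, 1]]

def Spec_solution (boxes : List (List Int)) (out : Int) : Prop := out = solution_alt boxes
instance (boxes : List (List Int)) (out : Int) : Decidable (Spec_solution boxes out) := by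
  unfold Spec_solution; infer_instance

-- ===== CLAIM (what is proved, stated in full; the proofs are below) =====
def Claim_equal_solution : Prop :=
  ∀ (boxes : List (List Int)), Dom_solution boxes → Pre_solution boxes →
    Spec_solution boxes (solution boxes)

-- ===== LEMMAS AND PROOFS =====

-- structural form of pvScan
def scanGo : List Int → Int → List Int × Int
  | [], v => ([], v)
  | x :: tl, v =>
    if v = x then
      let s := scanGo tl 0
      (0 :: s.1, s.2)
    else
      let s := scanGo tl v
      (x :: s.1, s.2)

-- zero out the first occurrence of v
def zf : List Int → Int → List Int
  | [], _ => []
  | x :: tl, v => if x = v then 0 :: tl else x :: zf tl v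

lemma scanGo_zero (lst : List Int) : scanGo lst 0 = (lst, 0) := by
  induction lst with
  | nil => rfl
  | cons x tl ih =>
    simp only [scanGo]
    by_cases h : (0 : Int) = x
    · rw [if_pos h, ih]; simp [← h]
    · rw [if_neg h, ih]

lemma scanGo_not_mem (lst : List Int) (v : Int) (h : v ∉ lst) : scanGo lst v = (lst, v) := by
  induction lst with
  | nil => rfl
  | cons x tl ih =>
    simp only [List.mem_cons, not_or] at h
    simp [scanGo, h.1, ih h.2]

lemma scanGo_mem (lst : List Int) (v : Int) (h : v ∈ lst) :
    scanGo lst v = (zf lst v, 0) := by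
  induction lst with
  | nil => cases h
  | cons x tl ih =>
    by_cases hx : v = x
    · simp [scanGo, zf, hx, scanGo_zero]
    · have : v ∈ tl := by
        rcases List.mem_cons.mp h with h' | h'
        · exact absurd h' hx
        · exact h'
      simp [scanGo, zf, hx, Ne.symm hx, ih this]

lemma pvScan_aux (tl : List Int) : ∀ (acc : List Int) (v : Int),
    (List.range' acc.length tl.length).foldl
      (fun s k => if s.2 == s.1.getD k 0 then (s.1.set k 0, 0) else s) (acc ++ tl, v)
    = (acc ++ (scanGo tl v).1, (scanGo tl v).2) := by
  induction tl with
  | nil => intro acc v; simp [scanGo]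
  | cons x tl ih =>
    intro acc v
    simp only [List.length_cons]
    rw [List.range'_succ]
    simp only [List.foldl_cons]
    have hget : (acc ++ x :: tl).getD acc.length 0 = x := by
      simp [List.getD, List.getElem?_append_right (Nat.le_refl acc.length)]
    have hset : (acc ++ x :: tl).set acc.length 0 = (acc ++ [0]) ++ tl := by
      rw [List.set_append_right _ _ (Nat.le_refl acc.length)]
      simp
    by_cases hv : v = x
    · simp only [hget, hv, BEq.rfl, if_pos, hset]
      have := ih (acc ++ [0]) 0
      simp only [List.length_append, List.length_cons, List.length_nil] at this ⊢
      rw [show acc.length + 1 = acc.length + 1 from rfl] at this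
      simpa [scanGo, hv, List.append_assoc] using this
    · have hbeq : (v == x) = false := by simp [hv]
      simp only [hget, hbeq, if_neg, Bool.false_eq_true, not_false_eq_true]
      have := ih (acc ++ [x]) v
      simp only [List.length_append, List.length_cons, List.length_nil] at this ⊢
      simpa [scanGo, hv, List.append_assoc] using this

lemma pvScan_eq_scanGo (lst : List Int) (v : Int) : pvScan lst v = scanGo lst v := by
  have := pvScan_aux lst [] v
  simpa [pvScan, List.range_eq_range'] using this

-- unified characterisation of one j-step
lemma pvStepJ_eq (lst : List Int) (v : Int) :
    pvStepJ lst v = if v ≠ 0 ∧ v ∈ lst then zf lst v ++ [0] else lst ++ [v] := by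
  rcases lst with _ | ⟨x, tl⟩
  · simp [pvStepJ]
  · rw [pvStepJ]
    simp only [List.length_cons, pvScan_eq_scanGo]
    by_cases hv : v = 0
    · subst hv; simp [scanGo_zero]
    · by_cases hm : v ∈ x :: tl
      · simp [scanGo_mem _ _ hm, hv, hm]
      · simp [scanGo_not_mem _ _ hm, hv, hm]

-- counting facts about zf
lemma zf_count_self (lst : List Int) (v : Int) (h : v ∈ lst) (hv : v ≠ 0) :
    (zf lst v).count v + 1 = lst.count v := by
  induction lst with
  | nil => cases h
  | cons x tl ih =>
    by_cases hx : x = v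
    · subst hx
      simp [zf, List.count_cons, Ne.symm hv]
    · have : v ∈ tl := by
        rcases List.mem_cons.mp h with h' | h'
        · exact absurd h'.symm hx
        · exact h'
      simp [zf, hx, List.count_cons, ih this]

lemma zf_count_other (lst : List Int) (v w : Int) (hw : w ≠ v) (hw0 : w ≠ 0) :
    (zf lst v).count w = lst.count w := by
  induction lst with
  | nil => rfl
  | cons x tl ih =>
    by_cases hx : x = v
    · simp [zf, hx, List.count_cons, Ne.symm hw0, Ne.symm hw]
    · simp [zf, hx, List.count_cons, ih]

lemma zf_countP (lst : List Int) (v : Int) (h : v ∈ lst) (hv : v ≠ 0) :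
    (zf lst v).countP (fun x => x != 0) + 1 = lst.countP (fun x => x != 0) := by
  induction lst with
  | nil => cases h
  | cons x tl ih =>
    by_cases hx : x = v
    · subst hx
      simp [zf, List.countP_cons, hv]
    · have : v ∈ tl := by
        rcases List.mem_cons.mp h with h' | h'
        · exact absurd h'.symm hx
        · exact h'
      rw [zf, if_neg hx]
      have h2 := ih this
      by_cases hx0 : x = 0
      · simp only [List.countP_cons, hx0]
        simp
        omega
      · simp only [List.countP_cons]
        simp [hx0]
        omega

lemma mem_iff_count_parity (lst : List Int) (v : Int) (p : List Int)
    (hc : lst.count v = p.count v % 2) : (v ∈ lst) ↔ p.count v % 2 = 1 := by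
  constructor
  · intro h
    have := List.count_pos_iff.mpr h
    omega
  · intro h
    have : 0 < lst.count v := by omega
    exact List.count_pos_iff.mp this

-- sum over a nodup key list when only the v entry changes
lemma sum_map_diff (K : List Int) (f g : Int → Int) (v : Int) (hnd : K.Nodup) (hv : v ∈ K)
    (hoff : ∀ k ∈ K, k ≠ v → f k = g k) :
    (K.map f).sum = (K.map g).sum + (f v - g v) := by
  induction K with
  | nil => cases hv
  | cons x tl ih =>
    simp only [List.nodup_cons] at hnd
    rcases List.mem_cons.mp hv with h | h
    · subst h
      have : tl.map f = tl.map g := by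
        apply List.map_congr_left
        intro k hk
        exact hoff k (List.mem_cons_of_mem _ hk) (fun he => hnd.1 (he ▸ hk))
      simp [this]; ring
    · have hx : x ≠ v := fun he => hnd.1 (he ▸ h)
      have := ih hnd.2 h (fun k hk hne => hoff k (List.mem_cons_of_mem _ hk) hne)
      simp [List.map_cons, List.sum_cons, this, hoff x (List.mem_cons_self) hx]
      ring

-- the main invariant: processing 'rest' changes the nonzero-count by the change in parity sums
lemma main_inv (rest : List Int) : ∀ (p lst : List Int) (K : List Int), K.Nodup →
    (∀ v ∈ rest, v ≠ 0 → v ∈ K) → (∀ v ∈ K, v ≠ 0) →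
    (∀ v : Int, v ≠ 0 → lst.count v = p.count v % 2) →
    ((rest.foldl pvStepJ lst).countP (fun x => x != 0) : Int)
      - (lst.countP (fun x => x != 0) : Int)
    = (K.map (fun k => (((p ++ rest).count k : Int)) % 2)).sum
      - (K.map (fun k => ((p.count k : Int)) % 2)).sum := by
  induction rest with
  | nil => intro p lst K _ _ _ _; simp
  | cons v rest ih =>
    intro p lst K hnd hmem hK0 hc
    simp only [List.foldl_cons]
    have hstep := pvStepJ_eq lst v
    -- invariant preserved
    have hc' : ∀ w : Int, w ≠ 0 → (pvStepJ lst v).count w = (p ++ [v]).count w % 2 := by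
      intro w hw
      rw [hstep]
      by_cases hv : v = 0
      · subst hv
        simp only [ne_eq, not_true_eq_false, false_and, if_neg, not_false_eq_true]
        simp [List.count_append, List.count_cons, hw, hc w hw, Ne.symm hw]
      · by_cases hm : v ∈ lst
        · simp only [ne_eq, hv, not_false_eq_true, hm, and_self, if_pos]
          by_cases hwv : w = v
          · subst hwv
            have h1 := zf_count_self lst w hm hv
            have h2 := hc w hw
            have hpar := (mem_iff_count_parity lst w p (hc w hw)).mp hm
            simp [List.count_append, List.count_cons, Ne.symm hw]
            omega
          · simp [List.count_append, List.count_cons, Ne.symm hw, Ne.symm hwv,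
              zf_count_other lst v w hwv hw, hc w hw]
        · simp only [ne_eq, hv, not_false_eq_true, hm, and_false, if_neg]
          by_cases hwv : w = v
          · subst hwv
            have hpar : p.count w % 2 = 0 := by
              have h2 := hc w hw
              have hcount : lst.count w = 0 := List.count_eq_zero.mpr hm
              omega
            simp [List.count_append, List.count_cons, hc w hw]
            omega
          · simp [List.count_append, List.count_cons, Ne.symm hwv, hc w hw]
    have hrec := ih (p ++ [v]) (pvStepJ lst v) K hnd
      (fun w hw hw0 => hmem w (List.mem_cons_of_mem _ hw) hw0) hK0 hc'
    rw [show p ++ v :: rest = (p ++ [v]) ++ rest by simp]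
    -- it remains to compare the one-step changes
    have hstepsum :
        ((pvStepJ lst v).countP (fun x => x != 0) : Int)
          - (lst.countP (fun x => x != 0) : Int)
        = (K.map (fun k => (((p ++ [v]).count k : Int)) % 2)).sum
          - (K.map (fun k => ((p.count k : Int)) % 2)).sum := by
      by_cases hv : v = 0
      · subst hv
        have hmap : K.map (fun k => ((List.count k (p ++ [(0:Int)]) : Int)) % 2)
            = K.map (fun k => ((List.count k p : Int)) % 2) := by
          apply List.map_congr_left
          intro k hk
          have hk0 := hK0 k hk
          simp [List.count_append, List.count_cons, hk0, Ne.symm hk0]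
        rw [hstep, hmap]
        simp [List.countP_append]
      · have hvK : v ∈ K := hmem v List.mem_cons_self hv
        have hsum := sum_map_diff K (fun k => (((p ++ [v]).count k : Int)) % 2)
          (fun k => ((p.count k : Int)) % 2) v hnd hvK ?_
        · rw [hsum, hstep]
          by_cases hm : v ∈ lst
          · have hpar := (mem_iff_count_parity lst v p (hc v hv)).mp hm
            have hz := zf_countP lst v hm hv
            simp only [ne_eq, hv, not_false_eq_true, hm, and_self, if_pos]
            have : ((p ++ [v]).count v : Int) % 2 = 0 := by
              simp [List.count_append, List.count_cons]
              omega
            rw [this]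
            simp [List.countP_append]
            push_cast
            omega
          · have hcount : lst.count v = 0 := List.count_eq_zero.mpr hm
            have hpar : p.count v % 2 = 0 := by have := hc v hv; omega
            simp only [ne_eq, hv, not_false_eq_true, hm, and_false, if_neg]
            have : ((p ++ [v]).count v : Int) % 2 = 1 := by
              simp [List.count_append, List.count_cons]
              omega
            rw [this]
            simp [List.countP_append, hv]
            push_cast
            omega
        · intro k hk hkv
          simp [List.count_append, List.count_cons, hkv, Ne.symm hkv]
    omega

-- flatten A's nested loops to a fold over the stream of the first two entries of each box
lemma solutionA_flat (boxes : List (List Int)) (h : ∀ b ∈ boxes, 2 ≤ b.length) :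
    ∀ lst : List Int,
    boxes.foldl
      (fun lst box =>
        (List.range 2).foldl (fun lst (j : Nat) => pvStepJ lst ((PySem.List.pyGet? box (j : Int)).getD 0)) lst)
      lst
    = (boxes.flatMap (fun b => [b.getD 0 0, b.getD 1 0])).foldl pvStepJ lst := by
  induction boxes with
  | nil => intro lst; simp
  | cons b tl ih =>
    intro lst
    have hb := h b List.mem_cons_self
    have h0 : (PySem.List.pyGet? b (0 : Int)).getD 0 = b.getD 0 0 := by
      rcases b with _ | ⟨x, tl'⟩
      · simp at hb
      · simp [PySem.List.pyGet?, PySem.List.pyIdx?]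
    have h1 : (PySem.List.pyGet? b (1 : Int)).getD 0 = b.getD 1 0 := by
      rcases b with _ | ⟨x, _ | ⟨y, tl'⟩⟩
      · simp at hb
      · simp at hb
      · simp [PySem.List.pyGet?, PySem.List.pyIdx?]
    simp only [List.foldl_cons, List.flatMap_cons, List.foldl_append]
    rw [show (List.range 2) = ([0, 1] : List Nat) from rfl]
    simp only [List.foldl_cons, List.foldl_nil, Nat.cast_zero, Nat.cast_one, h0, h1]
    exact ih (fun b hb => h b (List.mem_cons_of_mem _ hb)) _

-- B's filtered fold is the Counter of the nonzero stream
lemma solutionB_flat (boxes : List (List Int)) (h : ∀ b ∈ boxes, 2 ≤ b.length) :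
    ∀ d : PySem.Dict Int Int,
    boxes.foldl
      (fun d box =>
        [(PySem.List.pyGet? box (0 : Int)).getD 0, (PySem.List.pyGet? box (1 : Int)).getD 0].foldl
          (fun d v => if v != 0 then d.insert v (d.getD v 0 + 1) else d) d)
      d
    = ((boxes.flatMap (fun b => [b.getD 0 0, b.getD 1 0])).filter (fun v => v != 0)).foldl
        (fun d v => d.insert v (d.getD v 0 + 1)) d := by
  induction boxes with
  | nil => intro d; simp
  | cons b tl ih =>
    intro d
    have hb := h b List.mem_cons_self
    have h0 : (PySem.List.pyGet? b (0 : Int)).getD 0 = b.getD 0 0 := by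
      rcases b with _ | ⟨x, tl'⟩
      · simp at hb
      · simp [PySem.List.pyGet?, PySem.List.pyIdx?]
    have h1 : (PySem.List.pyGet? b (1 : Int)).getD 0 = b.getD 1 0 := by
      rcases b with _ | ⟨x, _ | ⟨y, tl'⟩⟩
      · simp at hb
      · simp at hb
      · simp [PySem.List.pyGet?, PySem.List.pyIdx?]
    simp only [List.foldl_cons, List.flatMap_cons, List.filter_append, List.foldl_append, h0, h1]
    rw [List.foldl_filter (l := [b.getD 0 0, b.getD 1 0])]
    exact ih (fun b hb => h b (List.mem_cons_of_mem _ hb)) _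

-- ===== VERDICT (by name: the statement is the Claim_ definition above) =====
theorem solution_spec : Claim_equal_solution := by
  intro boxes _ hpre
  unfold Spec_solution solution solution_alt
  rw [solutionA_flat boxes hpre, solutionB_flat boxes hpre]
  generalize boxes.flatMap (fun b => [b.getD 0 0, b.getD 1 0]) = xs
  dsimp only
  congr 1
  -- B side: the fold is Counter(ys), its values are the counts over the key set
  rw [PySem.Dict.foldl_insert_getD_add_one_eq_counter,
    PySem.Dict.values_eq_map_keys _ (PySem.Dict.nodup_keys_counter _) 0,
    PySem.Dict.keys_counter, List.map_map]
  have hK0 : ∀ k ∈ PySem.Set.ofList (xs.filter (fun v => v != 0)), k ≠ 0 := by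
    intro k hk
    have hk' := (PySem.Set.mem_ofList _ _).mp hk
    simpa using (List.mem_filter.mp hk').2
  have hmap : (PySem.Set.ofList (xs.filter (fun v => v != 0))).map
        ((fun c => PySem.Int.mod c 2) ∘ fun k =>
          (PySem.Dict.counter (xs.filter (fun v => v != 0))).getD k 0)
      = (PySem.Set.ofList (xs.filter (fun v => v != 0))).map
        (fun k => ((List.count k xs : Int)) % 2) := by
    apply List.map_congr_left
    intro k hk
    have hk0 := hK0 k hk
    simp only [Function.comp_apply, PySem.Dict.getD_counter,
      PySem.Int.mod_eq_emod_of_pos (by norm_num : (0:Int) < 2)]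
    rw [List.count_filter (by simp [hk0])]
  rw [hmap]
  -- A side: the counting loop is countP, equal to the parity sum by the main invariant
  rw [PySem.List.foldl_if_add_one]
  have hA := main_inv xs [] [] (PySem.Set.ofList (xs.filter (fun v => v != 0)))
    (PySem.Set.nodup_ofList _)
    (fun v hv hv0 => (PySem.Set.mem_ofList _ _).mpr (List.mem_filter.mpr ⟨hv, by simpa using hv0⟩))
    hK0 (fun v hv => by simp)
  simp only [List.count_nil, List.nil_append, Nat.cast_zero, Int.zero_emod] at hA
  simp only [List.map_const', List.sum_replicate, smul_zero, sub_zero, List.countP_nil,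
    Nat.cast_zero] at hA
  omega
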